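-- pv_equiv track=rewrite | github.com/jim0607/Leetcode | Solutions/0562.Longest-Line-of-Consecutive-One-in-Matrix.py | longest_vertical_line
-- ===== SOURCE A (Python) =====
-- def longest_vertical_line(matrix):
--     m, n = len(matrix), len(matrix[0])
--     dp = [[0] * n for _ in range(m)]
--     for j in range(n):
--         if matrix[0][j] == 1:
--             dp[0][j] = 1
--     for j in range(n):
--         for i in range(1, m):
--             if matrix[i][j] == 1:
--                 dp[i][j] = dp[i-1][j] + 1
--
--     max_lens = 0
--     for i in range(m):
--         for j in range(n):
--             max_lens = max(max_lens, dp[i][j])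
--     return max_lens
-- ===== SOURCE B (Python) =====
-- def longest_vertical_line(matrix):
--     n = len(matrix[0])
--     best = 0
--     for j in range(n):
--         streak = 0
--         for row in matrix:
--             streak = streak + 1 if row[j] == 1 else 0
--             if streak > best:
--                 best = streak
--     return best
-- ===== Notes on version B (the rewrite author's own statement) =====
-- stated objective: simpler
-- what changed: Replaces the m x n DP table built in two passes plus a separate full-table max scan with a single fused column-wise pass that keeps one streak counter and a running maximum in O(1) extra space.
import Mathlib
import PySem

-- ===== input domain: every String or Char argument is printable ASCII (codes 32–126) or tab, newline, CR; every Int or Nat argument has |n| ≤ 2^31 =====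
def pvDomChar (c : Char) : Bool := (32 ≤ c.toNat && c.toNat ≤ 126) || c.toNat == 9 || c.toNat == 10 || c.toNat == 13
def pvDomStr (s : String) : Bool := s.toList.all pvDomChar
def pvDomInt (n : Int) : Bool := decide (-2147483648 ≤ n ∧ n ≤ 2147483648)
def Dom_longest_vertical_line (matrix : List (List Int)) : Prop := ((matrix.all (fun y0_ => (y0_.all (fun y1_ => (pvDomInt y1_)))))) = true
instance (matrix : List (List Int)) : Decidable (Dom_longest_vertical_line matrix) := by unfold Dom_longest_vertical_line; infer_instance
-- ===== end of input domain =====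

-- B is a simpler fused single pass per column (streak counter + running max, O(1) extra space)
-- instead of A's DP table built in two passes followed by a separate max scan.

-- ===== PORT A =====
-- matrix[i][j] / dp[i][j]: indices here are Nats and in range under Pre_, so getD is exact
def pvGet2 (xs : List (List Int)) (i j : Nat) : Int := (xs.getD i []).getD j 0
-- dp[i][j] = v (indices always in range for dp, which is m×n by construction)
def pvSet2 (dp : List (List Int)) (i j : Nat) (v : Int) : List (List Int) :=
  dp.set i ((dp.getD i []).set j v)

def longest_vertical_line (matrix : List (List Int)) : Int :=
  let m := matrix.length
  let n := (matrix.headD []).length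
  let dp0 : List (List Int) := (List.range m).map (fun _ => List.replicate n (0 : Int))
  let dp1 := (List.range n).foldl
    (fun dp j => if pvGet2 matrix 0 j == 1 then pvSet2 dp 0 j 1 else dp) dp0
  let dp2 := (List.range n).foldl
    (fun dp j =>
      (List.range' 1 (m - 1)).foldl
        (fun dp i =>
          if pvGet2 matrix i j == 1 then pvSet2 dp i j (pvGet2 dp (i - 1) j + 1) else dp)
        dp)
    dp1
  (List.range m).foldl
    (fun acc i => (List.range n).foldl (fun acc j => max acc (pvGet2 dp2 i j)) acc) 0

-- ===== PORT B =====
def longest_vertical_line_alt (matrix : List (List Int)) : Int :=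
  let n := (matrix.headD []).length
  (List.range n).foldl
    (fun best j =>
      (matrix.foldl
        (fun (p : Int × Int) row =>
          let s : Int := if row.getD j 0 == 1 then p.1 + 1 else 0
          (s, if s > p.2 then s else p.2))
        ((0 : Int), best)).2)
    0

-- ===== PRECONDITION & SPEC =====
-- Python A raises IndexError on the empty matrix (matrix[0]) and on a ragged matrix whose
-- row i is shorter than row 0 (matrix[i][j]); B raises on exactly the same inputs.
def Pre_longest_vertical_line (matrix : List (List Int)) : Prop :=
  matrix ≠ [] ∧ ∀ row ∈ matrix, (matrix.headD []).length ≤ row.length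
instance (matrix : List (List Int)) : Decidable (Pre_longest_vertical_line matrix) := by
  unfold Pre_longest_vertical_line; infer_instance

def pvWitness_longest_vertical_line : List (List Int) := [[1, 0], [1, 1]]

def Spec_longest_vertical_line (matrix : List (List Int)) (out : Int) : Prop := out = longest_vertical_line_alt matrix
instance (matrix : List (List Int)) (out : Int) : Decidable (Spec_longest_vertical_line matrix out) := by unfold Spec_longest_vertical_line; infer_instance

-- ===== CLAIM (what is proved, stated in full; the proofs are below) =====
def Claim_equal_longest_vertical_line : Prop := ∀ (matrix : List (List Int)), Dom_longest_vertical_line matrix → Pre_longest_vertical_line matrix → Spec_longest_vertical_line matrix (longest_vertical_line matrix)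

-- ===== LEMMAS AND PROOFS =====

-- the m×n table of a function, and pointwise update
def pvTab (m n : Nat) (f : Nat → Nat → Int) : List (List Int) :=
  (List.range m).map (fun i => (List.range n).map (f i))

def pvUpd (f : Nat → Nat → Int) (i j : Nat) (v : Int) : Nat → Nat → Int :=
  fun i' j' => if i' = i ∧ j' = j then v else f i' j'

-- column j of the matrix (0 past the end of a row, matching getD)
def pvCol (matrix : List (List Int)) (j : Nat) : List Int :=
  matrix.map (fun row => row.getD j 0)

-- vertical streak value at row i of a column
def pvSA (cs : List Int) : Nat → Int
  | 0 => if cs.getD 0 0 == 1 then 1 else 0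
  | Nat.succ i => if cs.getD (i + 1) 0 == 1 then pvSA cs i + 1 else 0

-- the list of streak values of a column, starting from streak s
def pvStL (cs : List Int) (s : Int) : List Int :=
  match cs with
  | [] => []
  | c :: t =>
    let s' : Int := if c == 1 then s + 1 else 0
    s' :: pvStL t s'

lemma pvSet_map_range {α : Type} (n : Nat) (h : Nat → α) (j : Nat) (v : α) :
    ((List.range n).map h).set j v
      = (List.range n).map (fun j' => if j' = j then v else h j') := by
  apply List.ext_getElem (by simp)
  intro k h1 h2
  simp only [List.getElem_set, List.getElem_map, List.getElem_range]
  rcases eq_or_ne j k with h | h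
  · subst h; simp
  · rw [if_neg h, if_neg (Ne.symm h)]

lemma pvTab_get2 {m n i j : Nat} (f : Nat → Nat → Int) (hi : i < m) (hj : j < n) :
    pvGet2 (pvTab m n f) i j = f i j := by
  simp [pvGet2, pvTab, List.getD_eq_getElem?_getD, List.getElem?_map, hi, hj]

lemma pvTab_set2 {m n i j : Nat} (f : Nat → Nat → Int) (v : Int) (hi : i < m) :
    pvSet2 (pvTab m n f) i j v = pvTab m n (pvUpd f i j v) := by
  unfold pvSet2 pvTab pvUpd
  have hrow : ((List.range m).map (fun i => (List.range n).map (f i))).getD i []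
      = (List.range n).map (f i) := by
    simp [List.getD_eq_getElem?_getD, List.getElem?_map, hi]
  rw [hrow, pvSet_map_range, pvSet_map_range]
  apply List.map_congr_left
  intro i' _
  rcases eq_or_ne i' i with h | h
  · subst h
    simp only [if_pos rfl]
    apply List.map_congr_left
    intro j' _
    rcases eq_or_ne j' j with h2 | h2 <;> simp [h2]
  · simp [h]

lemma pvCol_getD (matrix : List (List Int)) (j i : Nat) :
    (pvCol matrix j).getD i 0 = (matrix.getD i []).getD j 0 := by
  induction matrix generalizing i with
  | nil => simp [pvCol]
  | cons r t ih =>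
    cases i with
    | zero => simp [pvCol]
    | succ i' => simpa [pvCol] using ih i'

lemma pvCol_length (matrix : List (List Int)) (j : Nat) :
    (pvCol matrix j).length = matrix.length := by
  simp [pvCol]

lemma pvStL_length (cs : List Int) (s : Int) : (pvStL cs s).length = cs.length := by
  induction cs generalizing s with
  | nil => rfl
  | cons c t ih => simp [pvStL, ih]

lemma pvStL_getD_zero (cs : List Int) (s : Int) (h : 0 < cs.length) :
    (pvStL cs s).getD 0 0 = if cs.getD 0 0 == 1 then s + 1 else 0 := by
  cases cs with
  | nil => simp at h
  | cons c t => simp [pvStL]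

lemma pvStL_getD_succ (cs : List Int) (s : Int) (i : Nat) (h : i + 1 < cs.length) :
    (pvStL cs s).getD (i + 1) 0
      = if cs.getD (i + 1) 0 == 1 then (pvStL cs s).getD i 0 + 1 else 0 := by
  induction cs generalizing s i with
  | nil => simp at h
  | cons c t ih =>
    cases i with
    | zero =>
      have ht : 0 < t.length := by simp at h; omega
      simp only [pvStL, List.getD_cons_succ, List.getD_cons_zero]
      rw [pvStL_getD_zero t _ ht]
    | succ i' =>
      have h' : i' + 1 < t.length := by simp at h; omega
      simpa [pvStL, List.getD_cons_succ] using ih _ i' h'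

lemma pvSA_eq_stL (cs : List Int) (i : Nat) (h : i < cs.length) :
    pvSA cs i = (pvStL cs 0).getD i 0 := by
  induction i with
  | zero =>
    rw [pvStL_getD_zero cs 0 h]
    simp [pvSA]
  | succ i' ih =>
    rw [pvStL_getD_succ cs 0 i' h]
    have := ih (by omega)
    simp only [pvSA]
    rw [this]

-- pass 1 of A: dp[0][j] := 1 where matrix[0][j] == 1
lemma pvPass1 (matrix : List (List Int)) (n : Nat) (hm : 0 < matrix.length)
    (l : List Nat) (hl : ∀ x ∈ l, x < n) (f : Nat → Nat → Int) :
    l.foldl (fun dp j => if pvGet2 matrix 0 j == 1 then pvSet2 dp 0 j 1 else dp)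
      (pvTab matrix.length n f)
    = pvTab matrix.length n
        (fun i j => if i = 0 ∧ j ∈ l ∧ pvGet2 matrix 0 j == 1 then 1 else f i j) := by
  induction l generalizing f with
  | nil => simp
  | cons j t ih =>
    simp only [List.foldl_cons]
    by_cases hc : (pvGet2 matrix 0 j == 1) = true
    · rw [if_pos hc, pvTab_set2 f 1 hm, ih (fun x hx => hl x (List.mem_cons_of_mem _ hx))]
      congr 1
      funext i j'
      simp only [pvUpd, List.mem_cons]
      by_cases h1 : i = 0
      · subst h1
        by_cases h2 : j' = j
        · subst h2; simp [hc]
        · simp [h2]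
      · simp [h1]
    · rw [if_neg hc, ih (fun x hx => hl x (List.mem_cons_of_mem _ hx))]
      congr 1
      funext i j'
      simp only [List.mem_cons]
      by_cases h1 : i = 0
      · subst h1
        by_cases h2 : j' = j
        · subst h2; simp [hc]
        · simp [h2]
      · simp [h1]

-- inner loop of pass 2, one column j, rows 1..k
lemma pvPass2Inner (matrix : List (List Int)) (n j : Nat) (hj : j < n)
    (f : Nat → Nat → Int)
    (hf0 : f 0 j = pvSA (pvCol matrix j) 0)
    (hf : ∀ i, 1 ≤ i → i < matrix.length → f i j = 0)
    (k : Nat) (hk : k ≤ matrix.length - 1) :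
    (List.range' 1 k).foldl
        (fun dp i =>
          if pvGet2 matrix i j == 1 then pvSet2 dp i j (pvGet2 dp (i - 1) j + 1) else dp)
        (pvTab matrix.length n f)
    = pvTab matrix.length n
        (fun i' j' =>
          if j' = j ∧ 1 ≤ i' ∧ i' ≤ k then pvSA (pvCol matrix j) i' else f i' j') := by
  induction k with
  | zero =>
    simp only [List.range'_zero, List.foldl_nil]
    congr 1
    funext i' j'
    have : ¬(j' = j ∧ 1 ≤ i' ∧ i' ≤ 0) := by rintro ⟨_, h1, h2⟩; omega
    rw [if_neg this]
  | succ k ih =>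
    have hk' : k ≤ matrix.length - 1 := by omega
    have hkm : k + 1 < matrix.length := by omega
    have hrange : List.range' 1 (k + 1) = List.range' 1 k ++ [1 + k] := by
      rw [List.range'_1_concat]
    rw [hrange, List.foldl_append, ih hk']
    simp only [List.foldl_cons, List.foldl_nil]
    have h1k : 1 + k = k + 1 := by omega
    rw [h1k]
    set cs := pvCol matrix j with hcsdef
    have hcs : cs.getD (k + 1) 0 = pvGet2 matrix (k + 1) j := by
      rw [hcsdef, pvCol_getD]; rfl
    by_cases hc : (pvGet2 matrix (k + 1) j == 1) = true
    · rw [if_pos hc]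
      have hget : pvGet2 (pvTab matrix.length n
          (fun i' j' => if j' = j ∧ 1 ≤ i' ∧ i' ≤ k then pvSA cs i' else f i' j'))
          (k + 1 - 1) j = pvSA cs k := by
        simp only [Nat.add_sub_cancel]
        rw [pvTab_get2 _ (by omega) hj]
        cases k with
        | zero => simpa using hf0
        | succ k' => simp
      rw [hget, pvTab_set2 _ _ hkm]
      have hSAk : pvSA cs (k + 1) = pvSA cs k + 1 := by
        simp only [pvSA]
        rw [hcs, if_pos hc]
      congr 1
      funext i' j'
      simp only [pvUpd]
      by_cases hj' : j' = j
      · subst hj'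
        by_cases hi' : i' = k + 1
        · subst hi'
          simp [hSAk]
        · by_cases hr : 1 ≤ i' ∧ i' ≤ k
          · have : 1 ≤ i' ∧ i' ≤ k + 1 := ⟨hr.1, by omega⟩
            simp [hi', hr, this]
          · have : ¬(1 ≤ i' ∧ i' ≤ k + 1) := by omega
            simp [hi', hr, this]
      · simp [hj']
    · rw [if_neg hc]
      congr 1
      funext i' j'
      by_cases hj' : j' = j
      · subst hj'
        by_cases hi' : i' = k + 1
        · subst hi'
          have hr : ¬(1 ≤ k + 1 ∧ k + 1 ≤ k) := by omega
          have hSAk1 : pvSA cs (k + 1) = 0 := by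
            simp only [pvSA]
            rw [hcs, if_neg hc]
          simp only [if_neg (by omega : ¬(True ∧ 1 ≤ k + 1 ∧ k + 1 ≤ k)), hSAk1]
          simp [hf (k + 1) (by omega) hkm]
        · by_cases hr : 1 ≤ i' ∧ i' ≤ k
          · have : 1 ≤ i' ∧ i' ≤ k + 1 := ⟨hr.1, by omega⟩
            simp [hr, this]
          · have : ¬(1 ≤ i' ∧ i' ≤ k + 1) := by omega
            simp [hr, this]
      · simp [hj']

-- pass 2 of A over a set of columns
lemma pvPass2 (matrix : List (List Int)) (n : Nat)
    (l : List Nat) (hl : ∀ x ∈ l, x < n) (hnd : l.Nodup) (f : Nat → Nat → Int)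
    (hf : ∀ j ∈ l, f 0 j = pvSA (pvCol matrix j) 0
          ∧ ∀ i, 1 ≤ i → i < matrix.length → f i j = 0) :
    l.foldl
      (fun dp j =>
        (List.range' 1 (matrix.length - 1)).foldl
          (fun dp i =>
            if pvGet2 matrix i j == 1 then pvSet2 dp i j (pvGet2 dp (i - 1) j + 1) else dp)
          dp)
      (pvTab matrix.length n f)
    = pvTab matrix.length n
        (fun i j =>
          if j ∈ l ∧ 1 ≤ i ∧ i ≤ matrix.length - 1 then pvSA (pvCol matrix j) i
          else f i j) := by
  induction l generalizing f with
  | nil => simp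
  | cons j t ih =>
    simp only [List.foldl_cons]
    have hj : j < n := hl j (List.mem_cons_self ..)
    obtain ⟨hf0, hfz⟩ := hf j (List.mem_cons_self ..)
    rw [pvPass2Inner matrix n j hj f hf0 hfz (matrix.length - 1) le_rfl]
    have hjt : j ∉ t := (List.nodup_cons.mp hnd).1
    rw [ih (fun x hx => hl x (List.mem_cons_of_mem _ hx)) (List.nodup_cons.mp hnd).2 _ ?_]
    · congr 1
      funext i j'
      simp only [List.mem_cons]
      by_cases hj' : j' = j
      · subst hj'
        by_cases hr : 1 ≤ i ∧ i ≤ matrix.length - 1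
        · simp [hjt, hr]
        · simp [hjt, hr]
      · by_cases hmem : j' ∈ t
        · by_cases hr : 1 ≤ i ∧ i ≤ matrix.length - 1
          · simp [hmem, hj', hr]
          · simp [hmem, hj', hr]
        · simp [hmem, hj']
    · intro j2 hj2
      have hne : j2 ≠ j := fun h => hjt (h ▸ hj2)
      constructor
      · simp [hne]
        exact (hf j2 (List.mem_cons_of_mem _ hj2)).1
      · intro i h1 h2
        simp [hne]
        exact (hf j2 (List.mem_cons_of_mem _ hj2)).2 i h1 h2

-- running max distributes over max in the accumulator
lemma pvFoldlMaxDist (l : List Nat) (h : Nat → Int) (x y : Int) :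
    l.foldl (fun a j => max a (h j)) (max x y)
      = max (l.foldl (fun a j => max a (h j)) x) y := by
  induction l generalizing x with
  | nil => simp
  | cons j t ih =>
    simp only [List.foldl_cons]
    rw [max_right_comm, ih]

lemma pvFoldlStepDist (l : List Nat) (step : Int → Nat → Int)
    (H : ∀ x y j, step (max x y) j = max (step x j) y) (x y : Int) :
    l.foldl step (max x y) = max (l.foldl step x) y := by
  induction l generalizing x with
  | nil => simp
  | cons j t ih =>
    simp only [List.foldl_cons]
    rw [H, ih]

lemma pvFoldlSplit (l : List Nat) (step : Int → Nat → Int)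
    (H : ∀ x y j, step (max x y) j = max (step x j) y) (h : Nat → Int) (a : Int) :
    l.foldl (fun acc j => max (step acc j) (h j)) a
      = l.foldl (fun acc j => max acc (h j)) (l.foldl step a) := by
  induction l generalizing a with
  | nil => simp
  | cons j t ih =>
    simp only [List.foldl_cons]
    rw [ih, pvFoldlStepDist t step H]

-- exchanging the two max loops
lemma pvMaxComm (g : Nat → Nat → Int) (m n : Nat) (a : Int) :
    (List.range m).foldl
        (fun acc i => (List.range n).foldl (fun acc j => max acc (g i j)) acc) a
      = (List.range n).foldl
        (fun acc j => (List.range m).foldl (fun acc i => max acc (g i j)) acc) a := by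
  induction m generalizing a with
  | zero =>
    simp only [List.range_zero, List.foldl_nil]
    induction (List.range n) generalizing a with
    | nil => simp
    | cons j t ihn => simp only [List.foldl_cons, List.foldl_nil]; exact ihn a
  | succ m ih =>
    conv_lhs => rw [List.range_succ, List.foldl_append]
    simp only [List.foldl_cons, List.foldl_nil]
    have hfun : (fun (acc : Int) j =>
        (List.range (m + 1)).foldl (fun b i => max b (g i j)) acc)
        = (fun (acc : Int) j =>
            max ((List.range m).foldl (fun b i => max b (g i j)) acc) (g m j)) := by
      funext acc j
      rw [List.range_succ, List.foldl_append]
      simp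
    rw [hfun,
      pvFoldlSplit (List.range n)
        (fun acc j => (List.range m).foldl (fun b i => max b (g i j)) acc)
        (fun x y j => pvFoldlMaxDist (List.range m) (fun i => g i j) x y)
        (fun j => g m j) a,
      ← ih a]

-- running max over indices = running max over the list
lemma pvFoldlMaxGetD (l : List Int) (b : Int) :
    (List.range l.length).foldl (fun a i => max a (l.getD i 0)) b = l.foldl max b := by
  induction l generalizing b with
  | nil => simp
  | cons c t ih =>
    simp only [List.length_cons, List.range_succ_eq_map, List.foldl_cons, List.foldl_map,
      List.getD_cons_zero, List.getD_cons_succ]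
    exact ih (max b c)

lemma pvIfGtMax (a x : Int) : (if x > a then x else a) = max a x := by
  simp only [max_def]
  split_ifs <;> omega

-- B's per-column pair fold is a running max over the streak list
lemma pvPairFold (cs : List Int) (s b : Int) :
    (cs.foldl
        (fun (p : Int × Int) c =>
          ((if c == 1 then p.1 + 1 else 0 : Int),
            if (if c == 1 then p.1 + 1 else 0 : Int) > p.2 then
              (if c == 1 then p.1 + 1 else 0 : Int) else p.2))
        (s, b)).2
      = (pvStL cs s).foldl max b := by
  induction cs generalizing s b with
  | nil => simp [pvStL]
  | cons c t ih =>
    simp only [List.foldl_cons, pvStL]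
    rw [ih, pvIfGtMax]

-- ===== VERDICT (by name: the statement is the Claim_ definition above) =====
lemma pvAltInner (matrix : List (List Int)) (j : Nat) (best : Int) :
    (matrix.foldl
        (fun (p : Int × Int) row =>
          let s : Int := if row.getD j 0 == 1 then p.1 + 1 else 0
          (s, if s > p.2 then s else p.2))
        ((0 : Int), best)).2
      = (pvStL (pvCol matrix j) 0).foldl max best := by
  rw [← pvPairFold (pvCol matrix j) 0 best]
  unfold pvCol
  rw [List.foldl_map]

lemma pvAInner (matrix : List (List Int)) (j : Nat) (best : Int) :
    (List.range matrix.length).foldl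
        (fun b i => max b (pvSA (pvCol matrix j) i)) best
      = (pvStL (pvCol matrix j) 0).foldl max best := by
  have hlen : matrix.length = (pvStL (pvCol matrix j) 0).length := by
    rw [pvStL_length, pvCol_length]
  have h1 : (List.range matrix.length).foldl
      (fun b i => max b (pvSA (pvCol matrix j) i)) best
      = (List.range matrix.length).foldl
        (fun b i => max b ((pvStL (pvCol matrix j) 0).getD i 0)) best := by
    apply PySem.List.foldl_congr_mem
    intro acc i hi
    rw [pvSA_eq_stL (pvCol matrix j) i (by rw [pvCol_length]; exact List.mem_range.mp hi)]
  rw [h1, hlen, pvFoldlMaxGetD]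

theorem longest_vertical_line_spec : Claim_equal_longest_vertical_line := by
  intro matrix _ hpre
  obtain ⟨hne, _⟩ := hpre
  have hm : 0 < matrix.length := List.length_pos_of_ne_nil hne
  unfold Spec_longest_vertical_line
  simp only [longest_vertical_line, longest_vertical_line_alt]
  set n := (matrix.headD []).length with hn
  -- dp0 is the zero table
  have h0 : (List.range matrix.length).map (fun _ => List.replicate n (0 : Int))
      = pvTab matrix.length n (fun _ _ => 0) := by
    simp [pvTab, List.map_const']
  rw [h0, pvPass1 matrix n hm (List.range n) (fun x hx => List.mem_range.mp hx) _,
    pvPass2 matrix n (List.range n) (fun x hx => List.mem_range.mp hx) (List.nodup_range) _ ?hf]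
  case hf =>
    intro j hj
    constructor
    · have : (pvCol matrix j).getD 0 0 = pvGet2 matrix 0 j := by
        rw [pvCol_getD]; rfl
      simp only [pvSA, this, hj]
      by_cases hc : (pvGet2 matrix 0 j == 1) = true <;> simp [hc]
    · intro i h1 _
      simp [Nat.ne_of_gt h1]
  -- the max scan reads the streak table
  have hscan : (List.range matrix.length).foldl
      (fun acc i => (List.range n).foldl
        (fun acc j => max acc
          (pvGet2 (pvTab matrix.length n
            (fun i j =>
              if j ∈ List.range n ∧ 1 ≤ i ∧ i ≤ matrix.length - 1 then
                pvSA (pvCol matrix j) i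
              else if i = 0 ∧ j ∈ List.range n ∧ (pvGet2 matrix 0 j == 1) = true then 1
              else 0)) i j)) acc) 0
      = (List.range matrix.length).foldl
        (fun acc i => (List.range n).foldl
          (fun acc j => max acc (pvSA (pvCol matrix j) i)) acc) 0 := by
    apply PySem.List.foldl_congr_mem
    intro acc i hi
    apply PySem.List.foldl_congr_mem
    intro acc2 j hj
    have hij : i < matrix.length := List.mem_range.mp hi
    have hjn : j < n := List.mem_range.mp hj
    rw [pvTab_get2 _ hij hjn]
    congr 1
    by_cases h1 : i = 0
    · subst h1
      have hr : ¬(j ∈ List.range n ∧ 1 ≤ 0 ∧ 0 ≤ matrix.length - 1) := by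
        rintro ⟨_, h, _⟩; omega
      rw [if_neg hr]
      have hcg : (pvCol matrix j).getD 0 0 = pvGet2 matrix 0 j := by
        rw [pvCol_getD]; rfl
      simp only [pvSA, hcg]
      by_cases hc : (pvGet2 matrix 0 j == 1) = true <;> simp [hc, List.mem_range.mpr hjn]
    · have hr : j ∈ List.range n ∧ 1 ≤ i ∧ i ≤ matrix.length - 1 :=
        ⟨List.mem_range.mpr hjn, by omega, by omega⟩
      rw [if_pos hr]
  rw [hscan, pvMaxComm]
  apply PySem.List.foldl_congr_mem
  intro best j hj
  rw [pvAInner, ← pvAltInner]
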